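-- pv_equiv track=rewrite | github.com/FelixWolf/js-proofofwork | src/main/packer.py | encode_base95
-- ===== SOURCE A (Python) =====
-- def encode_base95(data):
--     BASE = 95
--     OFFSET = 32  # ASCII offset for printable characters
--
--     out = []
--     buffer = 0
--     buffer_size = 0
--
--     for byte in data:
--         buffer |= byte << buffer_size
--         buffer_size += 8
--
--         while buffer_size >= 6:
--             out.append((buffer & 0x3F) + OFFSET)
--             buffer >>= 6
--             buffer_size -= 6
--
--     if buffer_size > 0:
--         out.append((buffer & 0x3F) + OFFSET)
--
--     return out
-- ===== SOURCE B (Python) =====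
-- def encode_base95(data):
--     # Two fixed passes over the data instead of a rolling buffer with a nested
--     # while loop: fold everything into one big integer, then slice fixed
--     # 6-bit windows out of it.
--     num = (8 * len(data) + 5) // 6
--     value = 0
--     for i, byte in enumerate(data):
--         value |= byte << (8 * i)
--     out = []
--     for i in range(num):
--         out.append(((value >> (6 * i)) & 0x3F) + 32)
--     return out
-- ===== Notes on version B (the rewrite author's own statement) =====
-- stated objective: alternative
-- what changed: Replaces the rolling 6-bit buffer with its nested while-drain by two independent passes: one pass ORs all bytes into a single big integer at offsets 8*i, then a second pass extracts the ceil(8n/6) fixed 6-bit windows with ((value >> 6*i) & 0x3F) + 32.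
import Mathlib
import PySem

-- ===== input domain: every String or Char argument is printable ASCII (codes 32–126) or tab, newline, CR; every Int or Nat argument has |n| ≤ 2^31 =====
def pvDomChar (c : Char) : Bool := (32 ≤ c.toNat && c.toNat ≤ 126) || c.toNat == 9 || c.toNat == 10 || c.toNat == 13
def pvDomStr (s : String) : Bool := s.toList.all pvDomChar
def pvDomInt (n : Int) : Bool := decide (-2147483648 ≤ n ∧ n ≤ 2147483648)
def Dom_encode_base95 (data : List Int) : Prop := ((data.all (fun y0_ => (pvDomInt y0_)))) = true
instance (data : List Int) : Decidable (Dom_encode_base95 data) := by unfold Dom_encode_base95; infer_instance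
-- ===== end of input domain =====

-- B replaces A's rolling 6-bit buffer (with its nested while-drain) by two independent
-- passes: OR all bytes into one big integer, then extract the ceil(8n/6) fixed 6-bit
-- windows; an alternative decomposition of the same encoding (not faster).

-- ===== PORT A =====
-- the inner `while buffer_size >= 6` loop of A
def drainA (out : List Int) (buf : Int) (bs : Nat) : List Int × Int × Nat :=
  if 6 ≤ bs then drainA (out ++ [PySem.Int.band buf 63 + 32]) (buf >>> (6:Nat)) (bs - 6)
  else (out, buf, bs)
termination_by bs

-- buffer_size is ported as Nat: in A it starts at 0, gains 8 per byte and loses 6 only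
-- while ≥ 6, so it is always a nonnegative integer.
def encode_base95 (data : List Int) : List Int :=
  let st := data.foldl (fun (st : List Int × Int × Nat) (byte : Int) =>
      drainA st.1 (PySem.Int.bor st.2.1 (byte <<< st.2.2)) (st.2.2 + 8)) ([], 0, 0)
  if st.2.2 > 0 then st.1 ++ [PySem.Int.band st.2.1 63 + 32] else st.1

-- ===== PORT B =====
-- `8 * p.1` is the enumerate index (always ≥ 0) so `.toNat` is exact for the Nat shift
def encode_base95_alt (data : List Int) : List Int :=
  let num := (8 * data.length + 5) / 6
  let value := (PySem.List.enumerate data).foldl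
      (fun v p => PySem.Int.bor v (p.2 <<< (8 * p.1).toNat)) 0
  (List.range num).map (fun i => PySem.Int.band (value >>> (6 * i : Nat)) 63 + 32)

-- ===== PRECONDITION & SPEC =====
def Spec_encode_base95 (data : List Int) (out : List Int) : Prop := out = encode_base95_alt data
instance (data : List Int) (out : List Int) : Decidable (Spec_encode_base95 data out) := by unfold Spec_encode_base95; infer_instance

-- ===== CLAIM (what is proved, stated in full; the proofs are below) =====
def Claim_equal_encode_base95 : Prop := ∀ (data : List Int), Dom_encode_base95 data → Spec_encode_base95 data (encode_base95 data)

-- ===== LEMMAS AND PROOFS =====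

-- the list of chunks emitted after k windows of v have been cut
def outsW (v : Int) (k : Nat) : List Int :=
  (List.range k).map (fun m => PySem.Int.band (v >>> (6 * m : Nat)) 63 + 32)

-- the big integer assembled from `rest` when `i` bytes have already been consumed
def Wv : List Int → Nat → Int
  | [], _ => 0
  | b :: t, i => PySem.Int.bor (b <<< (8 * i)) (Wv t (i + 1))

-- ---- Nat bit lemmas ----

theorem nat_ldiff_eq_sub (n m : Nat) : n - (n &&& m) = Nat.ldiff n m := by
  induction n using Nat.binaryRec generalizing m with
  | zero => simp [Nat.ldiff]
  | bit b n ih =>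
    induction m using Nat.binaryRec with
    | zero =>
      have h0 : Nat.bit b n &&& 0 = 0 := by simp
      have h1 : Nat.ldiff (Nat.bit b n) 0 = Nat.bit b n := by simp [Nat.ldiff]
      rw [h0, h1]; omega
    | bit c m _ =>
      rw [Nat.land_bit, Nat.ldiff_bit, ← ih m]
      have h1 : n &&& m ≤ n := Nat.and_le_left
      simp only [Nat.bit_val]
      cases b <;> cases c <;> simp [Bool.toNat] <;> omega

theorem nat_shl_pred_testBit (m n k : Nat) :
    ((m + 1) <<< n - 1).testBit k = (decide (k < n) || m.testBit (k - n)) := by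
  rw [Nat.shiftLeft_eq, Nat.testBit_eq_decide_div_mod_eq, Nat.testBit_eq_decide_div_mod_eq]
  by_cases h : k < n
  · have e2 : (2:Nat)^n = 2^(n-k) * 2^k := by rw [← pow_add]; congr 1; omega
    have hB : 1 ≤ (2:Nat)^k := Nat.two_pow_pos _
    have hP : 1 ≤ (m+1) * 2^(n-k) :=
      Nat.one_le_iff_ne_zero.mpr (by positivity)
    have ex : (m+1) * 2^n - 1 = (2^k - 1) + 2^k * ((m+1) * 2^(n-k) - 1) := by
      rw [e2, ← mul_assoc]
      have e : 2^k * ((m+1) * 2^(n-k) - 1) = (m+1) * 2^(n-k) * 2^k - 2^k := by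
        rw [Nat.mul_sub, mul_one, mul_comm]
      rw [e]
      have hge : 2^k ≤ (m+1) * 2^(n-k) * 2^k := Nat.le_mul_of_pos_left _ (by omega)
      omega
    rw [ex, Nat.add_mul_div_left _ _ (by omega), Nat.div_eq_of_lt (by omega), Nat.zero_add]
    have e3 : (2:Nat)^(n-k) = 2 * 2^(n-k-1) := by
      rw [← pow_succ']; congr 1; omega
    have hodd : ((m+1) * 2^(n-k) - 1) % 2 = 1 := by
      rw [e3, Nat.mul_left_comm]
      have h1 : 1 ≤ (m+1) * 2^(n-k-1) :=
        Nat.one_le_iff_ne_zero.mpr (by positivity)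
      omega
    simp [h, hodd]
  · have e2 : (2:Nat)^k = 2^n * 2^(k-n) := by rw [← pow_add]; congr 1; omega
    have hdiv : ((m+1) * 2^n - 1) / 2^n = m := by
      have hB : 1 ≤ (2:Nat)^n := Nat.two_pow_pos _
      have ex : (m+1) * 2^n - 1 = (2^n - 1) + 2^n * m := by
        have e : (m+1) * 2^n = 2^n * m + 2^n := by ring
        omega
      rw [ex, Nat.add_mul_div_left _ _ (Nat.two_pow_pos _),
        Nat.div_eq_of_lt (by omega), Nat.zero_add]
    rw [e2, ← Nat.div_div_eq_div_mul, hdiv]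
    simp [h]

-- ---- Int bit lemmas ----

theorem int_tb_negSucc (m : Nat) (k : Nat) :
    (Int.negSucc m).testBit k = !m.testBit k := rfl

theorem int_tb_ofNat (m : Nat) (k : Nat) :
    (Int.ofNat m).testBit k = m.testBit k := rfl

theorem int_tb_coe (m : Nat) (k : Nat) :
    ((m : Int)).testBit k = m.testBit k := rfl

theorem neg_coe_sub_one (x : Nat) : -(x : Int) - 1 = Int.negSucc x := by
  rw [Int.negSucc_eq]; ring

theorem toNat_negSucc_aux (n : Nat) : (-Int.negSucc n - 1).toNat = n := by
  rw [Int.negSucc_eq]; omega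

theorem toNat_ofNat_aux (n : Nat) : (Int.ofNat n).toNat = n := rfl

theorem int_ext {a b : Int} (h : ∀ k, a.testBit k = b.testBit k) : a = b := by
  have pow2 (i j : Nat) (hij : i ≤ j) : i < 2 ^ j :=
    lt_of_le_of_lt hij Nat.lt_two_pow_self
  cases a with
  | ofNat m =>
    cases b with
    | ofNat n =>
      exact congrArg Int.ofNat (Nat.eq_of_testBit_eq fun k => h k)
    | negSucc n =>
      exfalso
      have hk := h (m + n)
      rw [show ((Int.ofNat m).testBit (m+n)) = m.testBit (m+n) from rfl,
        int_tb_negSucc, Nat.testBit_lt_two_pow (pow2 _ _ (by omega)),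
        Nat.testBit_lt_two_pow (pow2 _ _ (by omega))] at hk
      simp at hk
  | negSucc m =>
    cases b with
    | ofNat n =>
      exfalso
      have hk := h (m + n)
      rw [show ((Int.ofNat n).testBit (m+n)) = n.testBit (m+n) from rfl,
        int_tb_negSucc, Nat.testBit_lt_two_pow (pow2 _ _ (by omega)),
        Nat.testBit_lt_two_pow (pow2 _ _ (by omega))] at hk
      simp at hk
    | negSucc n =>
      have : m = n := Nat.eq_of_testBit_eq fun k => by
        have hk := h k
        rw [int_tb_negSucc, int_tb_negSucc] at hk
        simpa using hk
      rw [this]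

theorem int_tb_shr (a : Int) (n k : Nat) :
    (a >>> n).testBit k = a.testBit (k + n) := by
  cases a with
  | ofNat m =>
    show (Int.ofNat (m >>> n)).testBit k = (Int.ofNat m).testBit (k + n)
    rw [int_tb_ofNat, int_tb_ofNat, Nat.testBit_shiftRight, Nat.add_comm]
  | negSucc m =>
    show (Int.negSucc (m >>> n)).testBit k = (Int.negSucc m).testBit (k + n)
    rw [int_tb_negSucc, int_tb_negSucc, Nat.testBit_shiftRight, Nat.add_comm]

theorem int_tb_shl (a : Int) (n k : Nat) :
    (a <<< n).testBit k = (decide (n ≤ k) && a.testBit (k - n)) := by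
  cases a with
  | ofNat m =>
    show (Int.ofNat (m <<< n)).testBit k = _
    rw [int_tb_ofNat, int_tb_ofNat, Nat.testBit_shiftLeft]
  | negSucc m =>
    show (Int.negSucc ((m + 1) <<< n - 1)).testBit k = _
    rw [int_tb_negSucc, int_tb_negSucc, nat_shl_pred_testBit]
    by_cases hk : n ≤ k
    · simp [hk, Nat.not_lt.mpr hk]
    · simp [hk, Nat.lt_of_not_le hk]

theorem int_tb_bor (a b : Int) (k : Nat) :
    (PySem.Int.bor a b).testBit k = (a.testBit k || b.testBit k) := by
  unfold PySem.Int.bor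
  cases a with
  | ofNat m =>
    cases b with
    | ofNat n =>
      rw [if_pos (show (0:Int) ≤ Int.ofNat m from Int.ofNat_zero_le m),
        if_pos (show (0:Int) ≤ Int.ofNat n from Int.ofNat_zero_le n)]
      rw [toNat_ofNat_aux, toNat_ofNat_aux, int_tb_coe, int_tb_ofNat, int_tb_ofNat,
        Nat.testBit_lor]
    | negSucc n =>
      rw [if_pos (show (0:Int) ≤ Int.ofNat m from Int.ofNat_zero_le m),
        if_neg (by simp : ¬ (0:Int) ≤ Int.negSucc _)]
      rw [toNat_ofNat_aux, toNat_negSucc_aux, neg_coe_sub_one, int_tb_negSucc,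
        nat_ldiff_eq_sub, Nat.testBit_ldiff, int_tb_ofNat, int_tb_negSucc]
      cases m.testBit k <;> cases n.testBit k <;> rfl
  | negSucc m =>
    cases b with
    | ofNat n =>
      rw [if_neg (by simp : ¬ (0:Int) ≤ Int.negSucc _),
        if_pos (show (0:Int) ≤ Int.ofNat n from Int.ofNat_zero_le n)]
      rw [toNat_ofNat_aux, toNat_negSucc_aux, neg_coe_sub_one, int_tb_negSucc,
        nat_ldiff_eq_sub, Nat.testBit_ldiff, int_tb_ofNat, int_tb_negSucc]
      cases m.testBit k <;> cases n.testBit k <;> rfl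
    | negSucc n =>
      rw [if_neg (by simp : ¬ (0:Int) ≤ Int.negSucc _),
        if_neg (by simp : ¬ (0:Int) ≤ Int.negSucc _)]
      rw [toNat_negSucc_aux, toNat_negSucc_aux, neg_coe_sub_one, int_tb_negSucc,
        Nat.testBit_land, int_tb_negSucc, int_tb_negSucc]
      cases m.testBit k <;> cases n.testBit k <;> rfl

theorem int_tb_band (a b : Int) (k : Nat) :
    (PySem.Int.band a b).testBit k = (a.testBit k && b.testBit k) := by
  unfold PySem.Int.band
  cases a with
  | ofNat m =>
    cases b with
    | ofNat n =>
      rw [if_pos (show (0:Int) ≤ Int.ofNat m from Int.ofNat_zero_le m),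
        if_pos (show (0:Int) ≤ Int.ofNat n from Int.ofNat_zero_le n)]
      rw [toNat_ofNat_aux, toNat_ofNat_aux, int_tb_coe, int_tb_ofNat, int_tb_ofNat,
        Nat.testBit_land]
    | negSucc n =>
      rw [if_pos (show (0:Int) ≤ Int.ofNat m from Int.ofNat_zero_le m),
        if_neg (by simp : ¬ (0:Int) ≤ Int.negSucc _)]
      rw [toNat_ofNat_aux, toNat_negSucc_aux, int_tb_coe,
        nat_ldiff_eq_sub, Nat.testBit_ldiff, int_tb_ofNat, int_tb_negSucc]
  | negSucc m =>
    cases b with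
    | ofNat n =>
      rw [if_neg (by simp : ¬ (0:Int) ≤ Int.negSucc _),
        if_pos (show (0:Int) ≤ Int.ofNat n from Int.ofNat_zero_le n)]
      rw [toNat_ofNat_aux, toNat_negSucc_aux, int_tb_coe,
        nat_ldiff_eq_sub, Nat.testBit_ldiff, int_tb_ofNat, int_tb_negSucc]
      cases m.testBit k <;> cases n.testBit k <;> rfl
    | negSucc n =>
      rw [if_neg (by simp : ¬ (0:Int) ≤ Int.negSucc _),
        if_neg (by simp : ¬ (0:Int) ≤ Int.negSucc _)]
      rw [toNat_negSucc_aux, toNat_negSucc_aux, neg_coe_sub_one, int_tb_negSucc,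
        Nat.testBit_lor, int_tb_negSucc, int_tb_negSucc]
      cases m.testBit k <;> cases n.testBit k <;> rfl

theorem int_tb_63 (k : Nat) : (63 : Int).testBit k = decide (k < 6) := by
  rw [show (63 : Int) = Int.ofNat 63 from rfl, int_tb_ofNat,
    show (63 : Nat) = 2 ^ 6 - 1 by norm_num, Nat.testBit_two_pow_sub_one]

theorem int_shr_shr (a : Int) (m n : Nat) : (a >>> m) >>> n = a >>> (m + n) := by
  apply int_ext; intro k
  simp [int_tb_shr]; ring_nf

theorem int_bor_assoc (a b c : Int) :
    PySem.Int.bor (PySem.Int.bor a b) c = PySem.Int.bor a (PySem.Int.bor b c) := by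
  apply int_ext; intro k
  simp [int_tb_bor, Bool.or_assoc]

-- ---- structural lemmas ----

theorem band63_congr {x y : Int} (p : Nat)
    (h : ∀ j, j < 6 → x.testBit (j + p) = y.testBit (j + p)) :
    PySem.Int.band (x >>> p) 63 = PySem.Int.band (y >>> p) 63 := by
  apply int_ext; intro k
  simp only [int_tb_band, int_tb_shr, int_tb_63]
  by_cases hk : k < 6
  · rw [h k hk]
  · simp [hk]

theorem outsW_congr {x y : Int} {k : Nat}
    (h : ∀ j, j < 6 * k → x.testBit j = y.testBit j) : outsW x k = outsW y k := by
  unfold outsW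
  refine List.map_congr_left (fun m hm => ?_)
  rw [List.mem_range] at hm
  have : PySem.Int.band (x >>> (6 * m)) 63 = PySem.Int.band (y >>> (6 * m)) 63 := by
    refine band63_congr (6 * m) (fun j hj => h _ (by omega))
  rw [this]

theorem buf_step (v b : Int) (i k : Nat) (h : 6 * k ≤ 8 * i) :
    PySem.Int.bor (v >>> (6 * k)) (b <<< (8 * i - 6 * k))
      = (PySem.Int.bor v (b <<< (8 * i))) >>> (6 * k) := by
  apply int_ext; intro j
  simp only [int_tb_bor, int_tb_shr, int_tb_shl]
  have h1 : (8 * i - 6 * k ≤ j) ↔ (8 * i ≤ j + 6 * k) := by omega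
  by_cases hc : 8 * i ≤ j + 6 * k
  · have e1 : j - (8 * i - 6 * k) = j + 6 * k - 8 * i := by omega
    simp [hc, h1.mpr hc, e1]
  · have : ¬ (8 * i - 6 * k ≤ j) := fun hx => hc (h1.mp hx)
    simp [hc, this]

theorem drain8 (out : List Int) (buf : Int) (bs : Nat) (h1 : 6 ≤ bs) (h2 : bs < 12) :
    drainA out buf bs = (out ++ [PySem.Int.band buf 63 + 32], buf >>> (6:Nat), bs - 6) := by
  rw [drainA, if_pos h1, drainA, if_neg (by omega)]

theorem drain12 (out : List Int) (buf : Int) (bs : Nat) (h1 : 12 ≤ bs) (h2 : bs < 18) :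
    drainA out buf bs = (out ++ [PySem.Int.band buf 63 + 32]
        ++ [PySem.Int.band (buf >>> (6:Nat)) 63 + 32], (buf >>> (6:Nat)) >>> (6:Nat), bs - 12) := by
  rw [drainA, if_pos (by omega), drain8 _ _ _ (by omega) (by omega)]
  simp; omega

theorem enum_fold (t : List Int) (s : Nat) (v : Int) :
    (PySem.List.enumerate t (s : Int)).foldl
        (fun v p => PySem.Int.bor v (p.2 <<< (8 * p.1).toNat)) v
      = PySem.Int.bor v (Wv t s) := by
  induction t generalizing s v with
  | nil => simp [PySem.List.enumerate, Wv, PySem.Int.bor_zero]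
  | cons b t ih =>
    simp only [PySem.List.enumerate, List.foldl_cons]
    have hcast : ((s : Int) + 1) = ((s + 1 : Nat) : Int) := by push_cast; ring
    have hsh : ((8 * (s : Int)).toNat) = 8 * s := by omega
    rw [hcast, ih, hsh, Wv, ← int_bor_assoc]

theorem outsW_succ (v : Int) (k : Nat) :
    outsW v (k + 1) = outsW v k ++ [PySem.Int.band (v >>> (6 * k : Nat)) 63 + 32] := by
  simp [outsW, List.range_succ]

theorem main_loop (rest : List Int) (i k : Nat) (v : Int)
    (hlo : 6 * k ≤ 8 * i) (hhi : 8 * i < 6 * k + 6) :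
    rest.foldl (fun (st : List Int × Int × Nat) (byte : Int) =>
        drainA st.1 (PySem.Int.bor st.2.1 (byte <<< st.2.2)) (st.2.2 + 8))
      (outsW v k, v >>> (6 * k), 8 * i - 6 * k)
      = (outsW (PySem.Int.bor v (Wv rest i)) ((8 * (i + rest.length)) / 6),
         (PySem.Int.bor v (Wv rest i)) >>> (6 * ((8 * (i + rest.length)) / 6)),
         8 * (i + rest.length) - 6 * ((8 * (i + rest.length)) / 6)) := by
  induction rest generalizing i k v with
  | nil =>
    have hk : (8 * (i + List.length ([] : List Int))) / 6 = k := by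
      simp only [List.length_nil]; omega
    simp only [List.foldl_nil, List.length_nil, Wv, PySem.Int.bor_zero, Nat.add_zero]
    have hk2 : 8 * i / 6 = k := by omega
    rw [hk2]
  | cons b t ih =>
    simp only [List.foldl_cons]
    rw [buf_step v b i k hlo]
    have hlow : ∀ j, j < 8 * i → v.testBit j = (PySem.Int.bor v (b <<< (8 * i))).testBit j := by
      intro j hj
      rw [int_tb_bor, int_tb_shl]
      have : ¬ (8 * i ≤ j) := by omega
      simp [this]
    have houts : outsW v k = outsW (PySem.Int.bor v (b <<< (8 * i))) k :=
      outsW_congr (fun j hj => hlow j (by omega))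
    rw [houts]
    set v1 := PySem.Int.bor v (b <<< (8 * i)) with hv1
    have hWv : PySem.Int.bor v1 (Wv t (i + 1)) = PySem.Int.bor v (Wv (b :: t) i) := by
      rw [hv1, int_bor_assoc]; rfl
    have hlen : (i + 1) + t.length = i + (b :: t).length := by
      simp [List.length_cons]; omega
    by_cases hc : 8 * i - 6 * k + 8 < 12
    · rw [drain8 _ _ _ (by omega) hc]
      rw [← outsW_succ v1 k, int_shr_shr]
      have e6 : 6 * k + 6 = 6 * (k + 1) := by ring
      have ebs : 8 * i - 6 * k + 8 - 6 = 8 * (i + 1) - 6 * (k + 1) := by omega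
      rw [e6, ebs, ih (i + 1) (k + 1) v1 (by omega) (by omega), hWv, hlen]
    · rw [drain12 _ _ _ (by omega) (by omega)]
      rw [int_shr_shr]
      have e6 : 6 * k + 6 = 6 * (k + 1) := by ring
      rw [e6, ← outsW_succ v1 k, int_shr_shr]
      have e62 : 6 * (k + 1) + 6 = 6 * (k + 2) := by ring
      have ebs : 8 * i - 6 * k + 8 - 12 = 8 * (i + 1) - 6 * (k + 2) := by omega
      rw [e62, ← outsW_succ v1 (k + 1), ebs,
        ih (i + 1) (k + 2) v1 (by omega) (by omega), hWv, hlen]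

-- ===== VERDICT (by name: the statement is the Claim_ definition above) =====
theorem encode_base95_spec : Claim_equal_encode_base95 := by
  intro data _
  show encode_base95 data = encode_base95_alt data
  have hm := main_loop data 0 0 0 (by omega) (by omega)
  have hstart : ((outsW 0 0, (0:Int) >>> (6*0 : Nat), 8*0 - 6*0) : List Int × Int × Nat)
      = ([], 0, 0) := by
    refine Prod.ext ?_ (Prod.ext ?_ ?_)
    · simp [outsW]
    · decide
    · rfl
  rw [hstart] at hm
  simp only [encode_base95, encode_base95_alt]
  rw [hm]
  have henum : (PySem.List.enumerate data 0) = PySem.List.enumerate data ((0:Nat):Int) := by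
    norm_num
  rw [henum, enum_fold data 0 0]
  set vf := PySem.Int.bor 0 (Wv data 0) with hvf
  set n := data.length with hn
  set K := (8 * (0 + n)) / 6 with hK
  show (if 8 * (0 + n) - 6 * K > 0
      then outsW vf K ++ [PySem.Int.band (vf >>> (6 * K : Nat)) 63 + 32]
      else outsW vf K)
    = outsW vf ((8 * n + 5) / 6)
  by_cases hpos : 8 * (0 + n) - 6 * K > 0
  · rw [if_pos hpos, ← outsW_succ vf K]
    have : (8 * n + 5) / 6 = K + 1 := by omega
    rw [this]
  · rw [if_neg hpos]
    have : (8 * n + 5) / 6 = K := by omega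
    rw [this]
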